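-- pv_equiv track=rewrite | github.com/davesfraser/tone-def | src/tonedef/component_mapper.py | _schema_id_lookup
-- ===== SOURCE A (Python) =====
-- def _schema_id_lookup(schema: dict) -> dict[int, str | None]:
--     """Return component_id -> canonical name when the id is unique."""
--     by_id: dict[int, str | None] = {}
--     for name, entry in schema.items():
--         component_id = entry.get("component_id")
--         if not isinstance(component_id, int):
--             continue
--         if component_id in by_id:
--             by_id[component_id] = None
--         else:
--             by_id[component_id] = name
--     return by_id
-- ===== SOURCE B (Python) =====
-- def _schema_id_lookup(schema: dict) -> dict[int, str | None]:
--     """Two-pass: tally ids, then assign name iff the id's count is 1."""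
--     counts: dict[int, int] = {}
--     for entry in schema.values():
--         cid = entry.get("component_id")
--         if isinstance(cid, int):
--             counts[cid] = counts.get(cid, 0) + 1
--     result: dict[int, str | None] = {}
--     for name, entry in schema.items():
--         cid = entry.get("component_id")
--         if isinstance(cid, int) and cid not in result:
--             result[cid] = name if counts.get(cid, 0) == 1 else None
--     return result
-- ===== Notes on version B (the rewrite author's own statement) =====
-- stated objective: alternative
-- what changed: Replaces A's single overwrite-on-duplicate pass (re-assigning an already-seen id to None) with a two-pass count-then-assign decomposition: first tally each int component_id, then build the result in one pass inserting each id once, with the name iff its count is 1.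
import Mathlib
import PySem

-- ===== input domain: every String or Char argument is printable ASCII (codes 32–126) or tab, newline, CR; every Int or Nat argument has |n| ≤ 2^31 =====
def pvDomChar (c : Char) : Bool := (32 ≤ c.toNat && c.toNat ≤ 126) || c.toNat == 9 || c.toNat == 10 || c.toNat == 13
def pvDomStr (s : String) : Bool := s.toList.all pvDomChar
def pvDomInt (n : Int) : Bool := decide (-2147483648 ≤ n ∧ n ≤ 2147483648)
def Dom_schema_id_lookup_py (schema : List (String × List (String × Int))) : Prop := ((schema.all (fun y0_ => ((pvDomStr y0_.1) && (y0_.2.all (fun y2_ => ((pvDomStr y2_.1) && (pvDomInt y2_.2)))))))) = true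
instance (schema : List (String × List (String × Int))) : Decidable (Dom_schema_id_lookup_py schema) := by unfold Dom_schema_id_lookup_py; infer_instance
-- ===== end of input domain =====

-- B replaces A's overwrite-on-duplicate single pass with a count-then-assign two-pass
-- decomposition (alternative, same cost); proved to return the identical dict.


-- ===== PORT A =====
-- for name, entry in schema.items(): look up "component_id" (first match, as Python dict);
-- if present: overwrite to None when already seen, else record the name.
def schema_id_lookup_py (schema : List (String × List (String × Int))) : List (Int × Option String) :=
  (schema.foldl (fun byId nmEntry =>
      match (PySem.Dict.mk nmEntry.2).get? "component_id" with
      | none => byId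
      | some componentId =>
          if byId.contains componentId then byId.insert componentId none
          else byId.insert componentId (some nmEntry.1))
    (PySem.Dict.empty : PySem.Dict Int (Option String))).items

-- ===== PORT B =====
-- pass 1: tally the component_ids; pass 2: insert each id once, name iff its count is 1.
def schema_id_lookup_py_alt (schema : List (String × List (String × Int))) : List (Int × Option String) :=
  let counts : PySem.Dict Int Int :=
    schema.foldl (fun c nmEntry =>
      match (PySem.Dict.mk nmEntry.2).get? "component_id" with
      | none => c
      | some cid => c.insert cid (c.getD cid 0 + 1)) PySem.Dict.empty
  (schema.foldl (fun res nmEntry =>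
      match (PySem.Dict.mk nmEntry.2).get? "component_id" with
      | none => res
      | some cid =>
          if res.contains cid then res
          else res.insert cid (if counts.getD cid 0 == 1 then some nmEntry.1 else none))
    (PySem.Dict.empty : PySem.Dict Int (Option String))).items

-- ===== PRECONDITION & SPEC =====
def Spec_schema_id_lookup_py (schema : List (String × List (String × Int))) (out : List (Int × Option String)) : Prop := out = schema_id_lookup_py_alt schema
instance (schema : List (String × List (String × Int))) (out : List (Int × Option String)) : Decidable (Spec_schema_id_lookup_py schema out) := by unfold Spec_schema_id_lookup_py; infer_instance

-- ===== CLAIM (what is proved, stated in full; the proofs are below) =====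
def Claim_equal_schema_id_lookup_py : Prop := ∀ (schema : List (String × List (String × Int))), Dom_schema_id_lookup_py schema → Spec_schema_id_lookup_py schema (schema_id_lookup_py schema)

-- ===== LEMMAS AND PROOFS =====

-- the (name, component_id) pairs both programs actually process, in order
def pvPairs (schema : List (String × List (String × Int))) : List (String × Int) :=
  schema.filterMap (fun e => ((PySem.Dict.mk e.2).get? "component_id").map (fun cid => (e.1, cid)))

-- A's loop body and B's second-pass loop body, named for the proofs
def pvStepA (d : PySem.Dict Int (Option String)) (p : String × Int) : PySem.Dict Int (Option String) :=
  if d.contains p.2 then d.insert p.2 none else d.insert p.2 (some p.1)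

def pvStepB (c : PySem.Dict Int Int) (d : PySem.Dict Int (Option String)) (p : String × Int) : PySem.Dict Int (Option String) :=
  if d.contains p.2 then d else d.insert p.2 (if c.getD p.2 0 == 1 then some p.1 else none)

-- set every entry whose key still occurs in ks to none
def pvNullify (ks : List Int) (its : List (Int × Option String)) : List (Int × Option String) :=
  its.map (fun p => if p.1 ∈ ks then (p.1, none) else p)

lemma pvFoldA_factor (schema : List (String × List (String × Int))) (d : PySem.Dict Int (Option String)) :
    schema.foldl (fun byId nmEntry =>
      match (PySem.Dict.mk nmEntry.2).get? "component_id" with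
      | none => byId
      | some componentId =>
          if byId.contains componentId then byId.insert componentId none
          else byId.insert componentId (some nmEntry.1)) d
    = (pvPairs schema).foldl pvStepA d := by
  induction schema generalizing d with
  | nil => rfl
  | cons e t ih =>
    simp only [pvPairs, List.filterMap_cons, List.foldl_cons]
    cases h : (PySem.Dict.mk e.2).get? "component_id" with
    | none => simpa [h, pvPairs] using ih d
    | some cid => simpa [h, pvPairs, pvStepA] using ih _

lemma pvFoldB_factor (schema : List (String × List (String × Int))) (c : PySem.Dict Int Int)
    (d : PySem.Dict Int (Option String)) :
    schema.foldl (fun res nmEntry =>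
      match (PySem.Dict.mk nmEntry.2).get? "component_id" with
      | none => res
      | some cid =>
          if res.contains cid then res
          else res.insert cid (if c.getD cid 0 == 1 then some nmEntry.1 else none)) d
    = (pvPairs schema).foldl (pvStepB c) d := by
  induction schema generalizing d with
  | nil => rfl
  | cons e t ih =>
    simp only [pvPairs, List.filterMap_cons, List.foldl_cons]
    cases h : (PySem.Dict.mk e.2).get? "component_id" with
    | none => simpa [h, pvPairs] using ih d
    | some cid => simpa [h, pvPairs, pvStepB] using ih _

lemma pvCounts_getD (schema : List (String × List (String × Int))) (k : Int) :
    (schema.foldl (fun c nmEntry =>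
      match (PySem.Dict.mk nmEntry.2).get? "component_id" with
      | none => c
      | some cid => c.insert cid (c.getD cid 0 + 1)) (PySem.Dict.empty : PySem.Dict Int Int)).getD k 0
    = (((pvPairs schema).map Prod.snd).count k : Int) := by
  have hfac : ∀ (d : PySem.Dict Int Int) (t : List (String × List (String × Int))),
      t.foldl (fun c nmEntry =>
        match (PySem.Dict.mk nmEntry.2).get? "component_id" with
        | none => c
        | some cid => c.insert cid (c.getD cid 0 + 1)) d
      = ((pvPairs t).map Prod.snd).foldl (fun c x => c.insert x (c.getD x 0 + 1)) d := by
    intro d t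
    induction t generalizing d with
    | nil => rfl
    | cons e t ih =>
      simp only [pvPairs, List.filterMap_cons, List.foldl_cons]
      cases h : (PySem.Dict.mk e.2).get? "component_id" with
      | none => simpa [h, pvPairs] using ih d
      | some cid => simpa [h, pvPairs] using ih _
  rw [hfac, PySem.Dict.getD_foldl_insert_add_one]
  simp

lemma pvMain (P : List (String × Int)) (c : PySem.Dict Int Int) (dA : PySem.Dict Int (Option String))
    (hnd : dA.keys.Nodup)
    (hc : ∀ k, dA.contains k = false → c.getD k 0 = ((P.map Prod.snd).count k : Int)) :
    P.foldl (pvStepB c) (PySem.Dict.mk (pvNullify (P.map Prod.snd) dA.items)) = P.foldl pvStepA dA := by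
  induction P generalizing dA with
  | nil =>
    simp only [List.foldl_nil, pvNullify, List.map_nil]
    simp
  | cons p P' ih =>
    obtain ⟨nm, cid⟩ := p
    have hcont : ∀ k, (PySem.Dict.mk (pvNullify ((cid :: P'.map Prod.snd)) dA.items)).contains k = dA.contains k := by
      intro k
      have hkeys : (PySem.Dict.mk (pvNullify ((cid :: P'.map Prod.snd)) dA.items)).keys = dA.keys := by
        simp only [pvNullify, PySem.Dict.keys, List.map_map]
        apply List.map_congr_left
        intro a _
        by_cases h : a.1 ∈ cid :: P'.map Prod.snd <;> simp [h]
      rw [PySem.Dict.contains_eq_decide_mem_keys, PySem.Dict.contains_eq_decide_mem_keys, hkeys]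
    simp only [List.map_cons, List.foldl_cons, pvStepA, pvStepB, hcont]
    by_cases hmem : dA.contains cid = true
    · -- duplicate: A overwrites to none, B leaves its (already-none) entry alone
      simp only [hmem, if_true]
      have hitems : pvNullify (cid :: P'.map Prod.snd) dA.items
          = pvNullify (P'.map Prod.snd) (dA.insert cid none).items := by
        rw [PySem.Dict.items_insert_of_contains dA none hmem]
        simp only [pvNullify, List.map_map]
        apply List.map_congr_left
        intro a _
        by_cases h : a.1 = cid
        · subst h; by_cases h2 : a.1 ∈ P'.map Prod.snd <;> simp [h2]
        · have hb : (a.1 == cid) = false := by simp [h]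
          by_cases h2 : a.1 ∈ P'.map Prod.snd <;> simp [h, h2]
      rw [hitems]
      apply ih
      · exact PySem.Dict.nodup_keys_insert dA cid none hnd
      · intro k hk
        rw [PySem.Dict.contains_insert] at hk
        have hne : k ≠ cid := by
          intro h; subst h; simp at hk
        have hkA : dA.contains k = false := by
          cases h : dA.contains k
          · rfl
          · simp [h] at hk
        have := hc k hkA
        simp only [List.map_cons, List.count_cons] at this
        simpa [Ne.symm hne] using this
    · -- first occurrence: A records the name, B decides by the total count
      have hmemf : dA.contains cid = false := by
        cases h : dA.contains cid
        · rfl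
        · exact absurd h hmem
      simp only [hmemf, Bool.false_eq_true, if_false]
      have hnotin : ∀ a ∈ dA.items, a.1 ≠ cid := by
        intro a ha h
        have hmk : cid ∈ dA.keys := by
          rw [← h]; exact List.mem_map_of_mem ha
        rw [PySem.Dict.contains_eq_decide_mem_keys] at hmemf
        simp [hmk] at hmemf
      have hcnt : c.getD cid 0 = 1 + ((P'.map Prod.snd).count cid : Int) := by
        have := hc cid hmemf
        simp only [List.map_cons, List.count_cons_self] at this
        rw [this]; push_cast; ring
      have hval : (if c.getD cid 0 == 1 then some nm else none)
          = (if cid ∈ P'.map Prod.snd then (none : Option String) else some nm) := by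
        by_cases h : cid ∈ P'.map Prod.snd
        · have h1 : 1 ≤ (P'.map Prod.snd).count cid := List.one_le_count_iff.mpr h
          have hb : (c.getD cid 0 == 1) = false := by
            rw [hcnt]
            simp only [beq_eq_false_iff_ne, ne_eq]
            omega
          simp [hb, h]
        · have h0 : (P'.map Prod.snd).count cid = 0 := List.count_eq_zero.mpr h
          have hb : (c.getD cid 0 == 1) = true := by rw [hcnt, h0]; simp
          simp [hb, h]
      have hdict : (PySem.Dict.mk (pvNullify (cid :: P'.map Prod.snd) dA.items)).insert cid
            (if c.getD cid 0 == 1 then some nm else none)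
          = PySem.Dict.mk (pvNullify (P'.map Prod.snd) (dA.insert cid (some nm)).items) := by
        apply PySem.Dict.ext
        have hcB : (PySem.Dict.mk (pvNullify (cid :: P'.map Prod.snd) dA.items)).contains cid = false := by
          rw [hcont]; exact hmemf
        rw [PySem.Dict.items_insert_of_not_contains _ _ hcB,
            PySem.Dict.items_insert_of_not_contains _ _ hmemf]
        simp only [pvNullify, List.map_append, List.map_cons, List.map_nil]
        congr 1
        · apply List.map_congr_left
          intro a ha
          have hne := hnotin a ha
          by_cases h2 : a.1 ∈ P'.map Prod.snd <;> simp [hne, h2]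
        · rw [hval]
          by_cases h : cid ∈ P'.map Prod.snd <;> simp [h]
      rw [hdict]
      apply ih
      · exact PySem.Dict.nodup_keys_insert dA cid (some nm) hnd
      · intro k hk
        rw [PySem.Dict.contains_insert] at hk
        have hne : k ≠ cid := by
          intro h; subst h; simp at hk
        have hkA : dA.contains k = false := by
          cases h : dA.contains k
          · rfl
          · simp [h] at hk
        have := hc k hkA
        simp only [List.map_cons, List.count_cons] at this
        simpa [Ne.symm hne] using this

-- ===== VERDICT (by name: the statement is the Claim_ definition above) =====
theorem schema_id_lookup_py_spec : Claim_equal_schema_id_lookup_py := by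
  intro schema _
  unfold Spec_schema_id_lookup_py schema_id_lookup_py schema_id_lookup_py_alt
  show (schema.foldl (fun byId nmEntry =>
      match (PySem.Dict.mk nmEntry.2).get? "component_id" with
      | none => byId
      | some componentId =>
          if byId.contains componentId then byId.insert componentId none
          else byId.insert componentId (some nmEntry.1))
    (PySem.Dict.empty : PySem.Dict Int (Option String))).items
    = (schema.foldl (fun res nmEntry =>
      match (PySem.Dict.mk nmEntry.2).get? "component_id" with
      | none => res
      | some cid =>
          if res.contains cid then res
          else res.insert cid (if (schema.foldl (fun c nmEntry =>
              match (PySem.Dict.mk nmEntry.2).get? "component_id" with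
              | none => c
              | some cid => c.insert cid (c.getD cid 0 + 1)) (PySem.Dict.empty : PySem.Dict Int Int)).getD cid 0 == 1
            then some nmEntry.1 else none))
    (PySem.Dict.empty : PySem.Dict Int (Option String))).items
  rw [pvFoldA_factor, pvFoldB_factor]
  congr 1
  have hc : ∀ k, (PySem.Dict.empty : PySem.Dict Int (Option String)).contains k = false →
      (schema.foldl (fun c nmEntry =>
        match (PySem.Dict.mk nmEntry.2).get? "component_id" with
        | none => c
        | some cid => c.insert cid (c.getD cid 0 + 1)) (PySem.Dict.empty : PySem.Dict Int Int)).getD k 0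
      = ((((pvPairs schema)).map Prod.snd).count k : Int) := by
    intro k _
    exact pvCounts_getD schema k
  have hm := pvMain (pvPairs schema) _ PySem.Dict.empty (by simp) hc
  have hnil : pvNullify ((pvPairs schema).map Prod.snd)
      (PySem.Dict.empty : PySem.Dict Int (Option String)).items = [] := rfl
  rw [hnil] at hm
  exact hm.symm
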